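-- pv_equiv track=rewrite | github.com/HOMEFTW/AndgateTechnology | tools/generate_multiblock.py | generate_piece_layers
-- ===== SOURCE A (Python) =====
-- def generate_piece_layers(widths_sub, section, place_controller=False):
--     """为一个区段生成填充后的层"""
--     char = 'B' if section == 'base' else 'C'
--     max_w = max(widths_sub) if widths_sub else 3
--
--     # 为了让所有区段在同一个大结构中对齐，使用统一最大宽度
--     # 但作为独立 piece，每个 piece 用自己的最大宽度
--     layers = []
--     controller_done = False
--
--     for y, w in enumerate(widths_sub):
--         offset = (max_w - w) // 2
--         z_plane = []
--         for z in range(max_w):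
--             if z < offset or z >= offset + w:
--                 z_plane.append(" " * max_w)
--             else:
--                 row = ""
--                 for x in range(max_w):
--                     if x < offset or x >= offset + w:
--                         row += " "
--                     elif x == offset or x == offset + w - 1 or z == offset or z == offset + w - 1:
--                         # 边缘
--                         if (place_controller and not controller_done
--                                 and y == 1 and z == offset and x == max_w // 2):
--                             row += '~'
--                             controller_done = True
--                         elif (place_controller and y == 1 and z == offset
--                               and (x == offset + 1 or x == offset + w - 2)):
--                             row += 'H'
--                         else:
--                             row += char
--                     else:
--                         row += '-'
--                 z_plane.append(row)
--         layers.append(z_plane)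
--
--     return layers
-- ===== SOURCE B (Python) =====
-- def generate_piece_layers(widths_sub, section, place_controller=False):
--     """Row-template build: each layer's rows are assembled once from padded string pieces
--     (blank / full border / hollow middle / controller row), then selected per z; no per-cell
--     scan and no controller_done flag (the controller cell occurs exactly once, in layer y==1)."""
--     char = 'B' if section == 'base' else 'C'
--     max_w = max(widths_sub) if widths_sub else 3
--     blank = " " * max_w
--     layers = []
--     for y, w in enumerate(widths_sub):
--         if w < 1:
--             layers.append([blank] * max_w)
--             continue
--         lo = (max_w - w) // 2
--         pad_l = " " * lo
--         pad_r = " " * (max_w - lo - w)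
--         full = pad_l + char * w + pad_r
--         mid = pad_l + (char + "-" * (w - 2) + char if w >= 2 else char * w) + pad_r
--         if place_controller and y == 1:
--             cells = [char] * w
--             if w >= 2:
--                 cells[1] = 'H'
--                 cells[w - 2] = 'H'
--             c = max_w // 2 - lo
--             if 0 <= c < w:
--                 cells[c] = '~'
--             top = pad_l + "".join(cells) + pad_r
--         else:
--             top = full
--         plane = []
--         for z in range(max_w):
--             if z < lo or z >= lo + w:
--                 plane.append(blank)
--             elif z == lo:
--                 plane.append(top)
--             elif z == lo + w - 1:
--                 plane.append(full)
--             else: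
--                 plane.append(mid)
--         layers.append(plane)
--     return layers
-- ===== Notes on version B (the rewrite author's own statement) =====
-- stated objective: faster
-- what changed: B replaces A's per-cell triple loop with controller_done flag by a row-template construction: for each layer it builds at most four padded row strings once (blank, full border, hollow middle, and a controller row made by patching a char-cell list at indices 1, w-2 and max_w//2-lo, '~' set last so it wins), then selects a template per z; no inner x loop and no flag.
import Mathlib
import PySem

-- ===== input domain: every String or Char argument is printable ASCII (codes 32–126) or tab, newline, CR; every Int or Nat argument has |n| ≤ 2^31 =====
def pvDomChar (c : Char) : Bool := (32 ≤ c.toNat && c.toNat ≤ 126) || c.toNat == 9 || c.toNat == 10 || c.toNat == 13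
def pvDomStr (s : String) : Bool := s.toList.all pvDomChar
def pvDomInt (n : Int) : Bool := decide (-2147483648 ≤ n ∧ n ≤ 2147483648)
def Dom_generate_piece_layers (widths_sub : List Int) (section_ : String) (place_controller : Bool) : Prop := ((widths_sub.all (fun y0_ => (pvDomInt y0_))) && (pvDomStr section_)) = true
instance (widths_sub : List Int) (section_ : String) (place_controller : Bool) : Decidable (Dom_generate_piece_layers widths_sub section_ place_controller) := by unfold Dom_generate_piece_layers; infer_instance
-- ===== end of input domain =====

-- B builds each layer from four row templates (blank / full border / hollow middle / patched
-- controller row) selected per z, instead of A's per-cell triple loop threading a controller_done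
-- flag (objective: faster, measured; return value only).

-- ===== PORT A =====
-- A-side helpers: the three nested loop bodies of A, each threading the controller_done flag.
def gplA_rowStep (char : Char) (pc : Bool) (y w lo c z : Int)
    (st : List Char × Bool) (x : Int) : List Char × Bool :=
  if x < lo ∨ lo + w ≤ x then (st.1 ++ [' '], st.2)
  else if x = lo ∨ x = lo + w - 1 ∨ z = lo ∨ z = lo + w - 1 then
    if pc = true ∧ st.2 = false ∧ y = 1 ∧ z = lo ∧ x = c then (st.1 ++ ['~'], true)
    else if pc = true ∧ y = 1 ∧ z = lo ∧ (x = lo + 1 ∨ x = lo + w - 2) then (st.1 ++ ['H'], st.2)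
    else (st.1 ++ [char], st.2)
  else (st.1 ++ ['-'], st.2)

def gplA_planeStep (char : Char) (pc : Bool) (maxw y w lo c : Int)
    (st : List String × Bool) (z : Int) : List String × Bool :=
  if z < lo ∨ lo + w ≤ z then (st.1 ++ [String.mk (List.replicate maxw.toNat ' ')], st.2)
  else
    let r := (PySem.List.pyRange 0 maxw 1).foldl (gplA_rowStep char pc y w lo c z) ([], st.2)
    (st.1 ++ [String.mk r.1], r.2)

def gplA_layerStep (char : Char) (pc : Bool) (maxw : Int)
    (st : List (List String) × Bool) (yw : Int × Int) : List (List String) × Bool :=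
  let lo := PySem.Int.floordiv (maxw - yw.2) 2
  let r := (PySem.List.pyRange 0 maxw 1).foldl
      (gplA_planeStep char pc maxw yw.1 yw.2 lo (PySem.Int.floordiv maxw 2)) ([], st.2)
  (st.1 ++ [r.1], r.2)

def generate_piece_layers (widths_sub : List Int) (section_ : String) (place_controller : Bool) : List (List String) :=
  let char : Char := if section_ = "base" then 'B' else 'C'
  let maxw : Int := match PySem.List.max? widths_sub (fun x => x) with
    | some m => m
    | none => 3
  ((PySem.List.enumerate widths_sub 0).foldl (gplA_layerStep char place_controller maxw) ([], false)).1

-- ===== PORT B =====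
-- B-side helper: one layer built from row templates (Source B's loop body).
def gplB_layer (char : Char) (pc : Bool) (maxw : Int) (blank : String) (yw : Int × Int) : List String :=
  let w := yw.2
  if 1 ≤ w then
    let lo := PySem.Int.floordiv (maxw - w) 2
    let padL : List Char := List.replicate lo.toNat ' '
    let padR : List Char := List.replicate (maxw - lo - w).toNat ' '
    let full : String := String.mk (padL ++ List.replicate w.toNat char ++ padR)
    let mid : String := String.mk (padL ++
      (if 2 ≤ w then char :: (List.replicate (w - 2).toNat '-' ++ [char])
       else List.replicate w.toNat char) ++ padR)
    let top : String :=
      if pc = true ∧ yw.1 = 1 then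
        let cells0 := List.replicate w.toNat char
        let cells1 := if 2 ≤ w then (cells0.set 1 'H').set (w - 2).toNat 'H' else cells0
        let c := PySem.Int.floordiv maxw 2 - lo
        let cells2 := if 0 ≤ c ∧ c < w then cells1.set c.toNat '~' else cells1
        String.mk (padL ++ cells2 ++ padR)
      else full
    (PySem.List.pyRange 0 maxw 1).map (fun z =>
      if z < lo ∨ lo + w ≤ z then blank
      else if z = lo then top
      else if z = lo + w - 1 then full
      else mid)
  else List.replicate maxw.toNat blank

def generate_piece_layers_alt (widths_sub : List Int) (section_ : String) (place_controller : Bool) : List (List String) :=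
  let char : Char := if section_ = "base" then 'B' else 'C'
  let maxw : Int := match PySem.List.max? widths_sub (fun x => x) with
    | some m => m
    | none => 3
  let blank : String := String.mk (List.replicate maxw.toNat ' ')
  (PySem.List.enumerate widths_sub 0).map (gplB_layer char place_controller maxw blank)

-- ===== PRECONDITION & SPEC =====
def Spec_generate_piece_layers (widths_sub : List Int) (section_ : String) (place_controller : Bool) (out : List (List String)) : Prop := out = generate_piece_layers_alt widths_sub section_ place_controller
instance (widths_sub : List Int) (section_ : String) (place_controller : Bool) (out : List (List String)) : Decidable (Spec_generate_piece_layers widths_sub section_ place_controller out) := by unfold Spec_generate_piece_layers; infer_instance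

-- ===== CLAIM (what is proved, stated in full; the proofs are below) =====
def Claim_equal_generate_piece_layers : Prop := ∀ (widths_sub : List Int) (section_ : String) (place_controller : Bool), Dom_generate_piece_layers widths_sub section_ place_controller → Spec_generate_piece_layers widths_sub section_ place_controller (generate_piece_layers widths_sub section_ place_controller)

-- ===== LEMMAS AND PROOFS =====

-- proof-only cell classifiers: what A's inner x-loop writes at column x
def gplCellBase (char : Char) (lo hi z x : Int) : Char :=
  if x < lo ∨ hi ≤ x then ' '
  else if x = lo ∨ x = hi - 1 ∨ z = lo ∨ z = hi - 1 then char
  else '-'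

def gplCellCtl (char : Char) (lo hi c x : Int) : Char :=
  if x < lo ∨ hi ≤ x then ' '
  else if x = c then '~'
  else if x = lo + 1 ∨ x = hi - 2 then 'H'
  else char

-- A's inner loop on a non-controller row produces the base classifier row
theorem gpl_row_plain (char : Char) (pc : Bool) (y w lo c z : Int)
    (h : ¬(pc = true ∧ y = 1 ∧ z = lo)) (xs : List Int) (acc : List Char) (d : Bool) :
    xs.foldl (gplA_rowStep char pc y w lo c z) (acc, d)
      = (acc ++ xs.map (gplCellBase char lo (lo + w) z), d) := by
  induction xs generalizing acc with
  | nil => simp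
  | cons x t ih =>
    have hstep : gplA_rowStep char pc y w lo c z (acc, d) x
        = (acc ++ [gplCellBase char lo (lo + w) z x], d) := by
      unfold gplA_rowStep gplCellBase
      by_cases h1 : x < lo ∨ lo + w ≤ x
      · simp [h1]
      · by_cases h2 : x = lo ∨ x = lo + w - 1 ∨ z = lo ∨ z = lo + w - 1
        · have hn1 : ¬(pc = true ∧ d = false ∧ y = 1 ∧ z = lo ∧ x = c) := by tauto
          have hn2 : ¬(pc = true ∧ y = 1 ∧ z = lo ∧ (x = lo + 1 ∨ x = lo + w - 2)) := by tauto
          simp [h1, h2, hn1, hn2]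
        · simp [h1, h2]
    simp only [List.foldl_cons, hstep, ih (acc ++ [gplCellBase char lo (lo + w) z x])]
    simp

-- A's inner loop on the controller row produces the controller classifier row
theorem gpl_row_ctl (char : Char) (pc : Bool) (w lo c : Int) (hpc : pc = true)
    (xs : List Int) (acc : List Char) (d : Bool) (hx : xs.Pairwise (· < ·))
    (hd : d = true → ∀ x ∈ xs, x ≠ c) :
    ∃ d', xs.foldl (gplA_rowStep char pc 1 w lo c lo) (acc, d)
      = (acc ++ xs.map (gplCellCtl char lo (lo + w) c), d') := by
  induction xs generalizing acc d with
  | nil => exact ⟨d, by simp⟩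
  | cons x t ih =>
    have hpw : ∀ x' ∈ t, x < x' := (List.pairwise_cons.mp hx).1
    have htp : t.Pairwise (· < ·) := (List.pairwise_cons.mp hx).2
    by_cases h1 : x < lo ∨ lo + w ≤ x
    · have hstep : gplA_rowStep char pc 1 w lo c lo (acc, d) x = (acc ++ [' '], d) := by
        unfold gplA_rowStep; simp [h1]
      have hcell : gplCellCtl char lo (lo + w) c x = ' ' := by
        unfold gplCellCtl; simp [h1]
      obtain ⟨d', hd'⟩ := ih (acc ++ [' ']) d htp (fun h x' hx' => hd h x' (List.mem_cons_of_mem _ hx'))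
      exact ⟨d', by simp [List.foldl_cons, hstep, hd', hcell]⟩
    · have h2 : x = lo ∨ x = lo + w - 1 ∨ lo = lo ∨ lo = lo + w - 1 := by tauto
      by_cases hxc : x = c
      · have hdf : d = false := by
          cases d with
          | false => rfl
          | true => exact absurd hxc (hd rfl x (List.mem_cons_self))
        subst hdf
        have hstep : gplA_rowStep char pc 1 w lo c lo (acc, false) x = (acc ++ ['~'], true) := by
          unfold gplA_rowStep
          rw [if_neg h1, if_pos h2, if_pos ⟨hpc, rfl, rfl, rfl, hxc⟩]
        have hcell : gplCellCtl char lo (lo + w) c x = '~' := by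
          unfold gplCellCtl; rw [if_neg h1, if_pos hxc]
        obtain ⟨d', hd'⟩ := ih (acc ++ ['~']) true htp (fun _ x' hx' => by
          have := hpw x' hx'; omega)
        exact ⟨d', by simp [List.foldl_cons, hstep, hd', hcell]⟩
      · have hn1 : ¬(pc = true ∧ d = false ∧ (1:Int) = 1 ∧ lo = lo ∧ x = c) := by tauto
        by_cases hH : x = lo + 1 ∨ x = lo + w - 2
        · have hstep : gplA_rowStep char pc 1 w lo c lo (acc, d) x = (acc ++ ['H'], d) := by
            unfold gplA_rowStep
            rw [if_neg h1, if_pos h2, if_neg hn1, if_pos ⟨hpc, rfl, rfl, hH⟩]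
          have hcell : gplCellCtl char lo (lo + w) c x = 'H' := by
            unfold gplCellCtl; simp [h1, hxc, hH]
          obtain ⟨d', hd'⟩ := ih (acc ++ ['H']) d htp (fun h x' hx' => hd h x' (List.mem_cons_of_mem _ hx'))
          exact ⟨d', by simp [List.foldl_cons, hstep, hd', hcell]⟩
        · have hn2 : ¬(pc = true ∧ (1:Int) = 1 ∧ lo = lo ∧ (x = lo + 1 ∨ x = lo + w - 2)) := by tauto
          have hstep : gplA_rowStep char pc 1 w lo c lo (acc, d) x = (acc ++ [char], d) := by
            unfold gplA_rowStep
            rw [if_neg h1, if_pos h2, if_neg hn1, if_neg hn2]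
          have hcell : gplCellCtl char lo (lo + w) c x = char := by
            unfold gplCellCtl; simp [h1, hxc, hH]
          obtain ⟨d', hd'⟩ := ih (acc ++ [char]) d htp (fun h x' hx' => hd h x' (List.mem_cons_of_mem _ hx'))
          exact ⟨d', by simp [List.foldl_cons, hstep, hd', hcell]⟩

-- a classifier row over the full x-range equals padding ++ body ++ padding
theorem gpl_map_window (f : Int → Char) (maxw lo w : Int) (body : List Char)
    (h0 : 0 ≤ lo) (h2 : lo + w ≤ maxw)
    (hlen : (body.length : Int) = w)
    (hout : ∀ x, 0 ≤ x → x < maxw → (x < lo ∨ lo + w ≤ x) → f x = ' ')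
    (hin : ∀ k : Nat, (hk : k < body.length) → f (lo + k) = body[k]) :
    (PySem.List.pyRange 0 maxw 1).map f
      = List.replicate lo.toNat ' ' ++ body ++ List.replicate (maxw - lo - w).toNat ' ' := by
  apply List.ext_getElem
  · simp only [List.length_map, PySem.List.length_pyRange_one, List.length_append,
      List.length_replicate]
    omega
  · intro k hk1 hk2
    simp only [List.length_map, PySem.List.length_pyRange_one] at hk1
    simp only [List.getElem_map, PySem.List.getElem_pyRange_one, zero_add]
    by_cases ha : k < lo.toNat
    · rw [List.getElem_append_left (by simp; omega), List.getElem_append_left (by simp [ha]),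
        List.getElem_replicate]
      exact hout k (by positivity) (by omega) (by omega)
    · by_cases hb : k < lo.toNat + body.length
      · rw [List.getElem_append_left (by simp; omega),
          List.getElem_append_right (by simp; omega)]
        simp only [List.length_replicate]
        have hkk : f (k : Int) = f (lo + ((k - lo.toNat : Nat) : Int)) := by
          congr 1; omega
        rw [hkk]
        exact hin (k - lo.toNat) (by omega)
      · rw [List.getElem_append_right (by simp; omega), List.getElem_replicate]
        exact hout k (by positivity) (by omega) (by omega)

-- row-template selector forms
theorem gpl_base_row_full (char : Char) (maxw lo w z : Int)
    (h0 : 0 ≤ lo) (h2 : lo + w ≤ maxw) (hw : 1 ≤ w)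
    (hz : z = lo ∨ z = lo + w - 1) :
    (PySem.List.pyRange 0 maxw 1).map (gplCellBase char lo (lo + w) z)
      = List.replicate lo.toNat ' ' ++ List.replicate w.toNat char
          ++ List.replicate (maxw - lo - w).toNat ' ' := by
  apply gpl_map_window _ _ _ _ _ h0 h2 (by simp; omega)
  · intro x _ _ hx
    unfold gplCellBase; rw [if_pos hx]
  · intro k hk
    simp only [List.length_replicate] at hk
    rw [List.getElem_replicate]
    unfold gplCellBase
    rw [if_neg (by omega), if_pos (by omega)]

theorem gpl_base_row_mid (char : Char) (maxw lo w z : Int)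
    (h0 : 0 ≤ lo) (h2 : lo + w ≤ maxw)
    (hz1 : lo < z) (hz2 : z < lo + w - 1) :
    (PySem.List.pyRange 0 maxw 1).map (gplCellBase char lo (lo + w) z)
      = List.replicate lo.toNat ' '
          ++ (char :: (List.replicate (w - 2).toNat '-' ++ [char]))
          ++ List.replicate (maxw - lo - w).toNat ' ' := by
  have hw : 3 ≤ w := by omega
  apply gpl_map_window _ _ _ _ _ h0 h2 (by simp; omega)
  · intro x _ _ hx
    unfold gplCellBase; rw [if_pos hx]
  · intro k hk
    have hk0 : k ≤ (w - 2).toNat + 1 := by simpa using hk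
    have hk' : k < (w - 2).toNat + 2 := by omega
    unfold gplCellBase
    rw [if_neg (by omega)]
    match k with
    | 0 => rw [if_pos (by omega)]; rfl
    | (j+1) =>
      by_cases hj : j < (w - 2).toNat
      · rw [if_neg (by omega)]
        simp only [List.getElem_cons_succ]
        rw [List.getElem_append_left (by simpa using hj), List.getElem_replicate]
      · rw [if_pos (by omega)]
        simp only [List.getElem_cons_succ]
        rw [List.getElem_append_right (by simpa using hj)]
        simp

theorem gpl_ctl_row (char : Char) (maxw lo w : Int)
    (h0 : 0 ≤ lo) (h2 : lo + w ≤ maxw) (hw : 1 ≤ w) (c' : Int) :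
    (PySem.List.pyRange 0 maxw 1).map (gplCellCtl char lo (lo + w) c')
      = List.replicate lo.toNat ' '
          ++ (if 0 ≤ c' - lo ∧ c' - lo < w then
                (if 2 ≤ w then ((List.replicate w.toNat char).set 1 'H').set (w - 2).toNat 'H'
                 else List.replicate w.toNat char).set (c' - lo).toNat '~'
              else if 2 ≤ w then ((List.replicate w.toNat char).set 1 'H').set (w - 2).toNat 'H'
              else List.replicate w.toNat char)
          ++ List.replicate (maxw - lo - w).toNat ' ' := by
  have hout : ∀ x, 0 ≤ x → x < maxw → (x < lo ∨ lo + w ≤ x) →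
      gplCellCtl char lo (lo + w) c' x = ' ' := by
    intro x _ _ hx
    unfold gplCellCtl; rw [if_pos hx]
  by_cases hw2 : 2 ≤ w
  · rw [if_pos hw2]
    by_cases hcc : 0 ≤ c' - lo ∧ c' - lo < w
    · rw [if_pos hcc]
      apply gpl_map_window _ _ _ _ _ h0 h2 (by simp; omega) hout
      intro k hk
      have hkw : k < w.toNat := by simpa using hk
      unfold gplCellCtl
      simp only [List.getElem_set, List.getElem_replicate]
      split_ifs <;> first | rfl | omega
    · rw [if_neg hcc]
      have hcc' : c' - lo < 0 ∨ w ≤ c' - lo := by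
        by_contra hq; push_neg at hq; exact hcc ⟨by omega, by omega⟩
      apply gpl_map_window _ _ _ _ _ h0 h2 (by simp; omega) hout
      intro k hk
      have hkw : k < w.toNat := by simpa using hk
      unfold gplCellCtl
      simp only [List.getElem_set, List.getElem_replicate]
      split_ifs <;> first | rfl | omega
  · rw [if_neg hw2]
    by_cases hcc : 0 ≤ c' - lo ∧ c' - lo < w
    · rw [if_pos hcc]
      apply gpl_map_window _ _ _ _ _ h0 h2 (by simp; omega) hout
      intro k hk
      have hkw : k < w.toNat := by simpa using hk
      unfold gplCellCtl
      simp only [List.getElem_set, List.getElem_replicate]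
      split_ifs <;> first | rfl | omega
    · rw [if_neg hcc]
      have hcc' : c' - lo < 0 ∨ w ≤ c' - lo := by
        by_contra hq; push_neg at hq; exact hcc ⟨by omega, by omega⟩
      apply gpl_map_window _ _ _ _ _ h0 h2 (by simp; omega) hout
      intro k hk
      have hkw : k < w.toNat := by simpa using hk
      unfold gplCellCtl
      simp only [List.getElem_replicate]
      split_ifs <;> first | rfl | omega

-- bounds on lo
theorem gpl_lo_bounds (maxw w : Int) (hw : w ≤ maxw) :
    0 ≤ PySem.Int.floordiv (maxw - w) 2 ∧ PySem.Int.floordiv (maxw - w) 2 + w ≤ maxw := by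
  have hfd : PySem.Int.floordiv (maxw - w) 2 = (maxw - w) / 2 :=
    PySem.Int.floordiv_eq_ediv_of_pos (by norm_num)
  constructor <;> rw [hfd] <;> omega

-- A's plane fold for a non-controller layer equals B's template layer
theorem gpl_plane_plain (char : Char) (pc : Bool) (maxw y w lo c : Int)
    (h : ¬(pc = true ∧ y = 1)) (zs : List Int) (acc : List String) (d : Bool) :
    zs.foldl (gplA_planeStep char pc maxw y w lo c) (acc, d)
      = (acc ++ zs.map (fun z =>
          if z < lo ∨ lo + w ≤ z then String.mk (List.replicate maxw.toNat ' ')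
          else String.mk ((PySem.List.pyRange 0 maxw 1).map (gplCellBase char lo (lo + w) z))), d) := by
  induction zs generalizing acc with
  | nil => simp
  | cons z t ih =>
    have hstep : gplA_planeStep char pc maxw y w lo c (acc, d) z
        = (acc ++ [if z < lo ∨ lo + w ≤ z then String.mk (List.replicate maxw.toNat ' ')
            else String.mk ((PySem.List.pyRange 0 maxw 1).map (gplCellBase char lo (lo + w) z))], d) := by
      unfold gplA_planeStep
      by_cases h1 : z < lo ∨ lo + w ≤ z
      · rw [if_pos h1, if_pos h1]
      · have h' : ¬(pc = true ∧ y = 1 ∧ z = lo) := fun hc => h ⟨hc.1, hc.2.1⟩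
        rw [if_neg h1, if_neg h1]
        simp only [gpl_row_plain char pc y w lo c z h' _ [] d, List.nil_append]
    rw [List.foldl_cons, hstep, ih]
    simp

-- A's plane fold for the controller layer
theorem gpl_plane_ctl (char : Char) (pc : Bool) (maxw w lo c : Int) (hpc : pc = true)
    (zs : List Int) (acc : List String) (d : Bool) (hz : zs.Pairwise (· < ·))
    (hd : d = true → ∀ z ∈ zs, z ≠ lo) :
    ∃ d', zs.foldl (gplA_planeStep char pc maxw 1 w lo c) (acc, d)
      = (acc ++ zs.map (fun z =>
          if z < lo ∨ lo + w ≤ z then String.mk (List.replicate maxw.toNat ' ')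
          else if z = lo then String.mk ((PySem.List.pyRange 0 maxw 1).map (gplCellCtl char lo (lo + w) c))
          else String.mk ((PySem.List.pyRange 0 maxw 1).map (gplCellBase char lo (lo + w) z))), d') := by
  induction zs generalizing acc d with
  | nil => exact ⟨d, by simp⟩
  | cons z t ih =>
    have hpw : ∀ z' ∈ t, z < z' := (List.pairwise_cons.mp hz).1
    have htp : t.Pairwise (· < ·) := (List.pairwise_cons.mp hz).2
    by_cases h1 : z < lo ∨ lo + w ≤ z
    · have hstep : gplA_planeStep char pc maxw 1 w lo c (acc, d) z
          = (acc ++ [String.mk (List.replicate maxw.toNat ' ')], d) := by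
        unfold gplA_planeStep; rw [if_pos h1]
      obtain ⟨d', hd'⟩ := ih (acc ++ [String.mk (List.replicate maxw.toNat ' ')]) d htp
        (fun h z' hz' => hd h z' (List.mem_cons_of_mem _ hz'))
      refine ⟨d', ?_⟩
      rw [List.foldl_cons, hstep, hd']
      simp [h1]
    · by_cases hzlo : z = lo
      · subst hzlo
        have hdf : d = false := by
          cases d with
          | false => rfl
          | true => exact absurd rfl (hd rfl z List.mem_cons_self)
        subst hdf
        obtain ⟨dr, hr⟩ := gpl_row_ctl char pc w z c hpc (PySem.List.pyRange 0 maxw 1) [] false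
          (PySem.List.pairwise_lt_pyRange_one 0 maxw) (by simp)
        have hstep : gplA_planeStep char pc maxw 1 w z c (acc, false) z
            = (acc ++ [String.mk ((PySem.List.pyRange 0 maxw 1).map (gplCellCtl char z (z + w) c))], dr) := by
          unfold gplA_planeStep
          rw [if_neg h1]
          simp only [hr, List.nil_append]
        obtain ⟨d', hd'⟩ := ih (acc ++ [String.mk ((PySem.List.pyRange 0 maxw 1).map (gplCellCtl char z (z + w) c))]) dr htp
          (fun _ z' hz' => by have := hpw z' hz'; omega)
        refine ⟨d', ?_⟩
        rw [List.foldl_cons, hstep, hd', List.map_cons, if_neg h1, if_pos rfl]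
        simp
      · have h' : ¬(pc = true ∧ (1:Int) = 1 ∧ z = lo) := fun hc => hzlo hc.2.2
        have hstep : gplA_planeStep char pc maxw 1 w lo c (acc, d) z
            = (acc ++ [String.mk ((PySem.List.pyRange 0 maxw 1).map (gplCellBase char lo (lo + w) z))], d) := by
          unfold gplA_planeStep
          rw [if_neg h1]
          simp only [gpl_row_plain char pc 1 w lo c z h' _ [] d, List.nil_append]
        obtain ⟨d', hd'⟩ := ih (acc ++ [String.mk ((PySem.List.pyRange 0 maxw 1).map (gplCellBase char lo (lo + w) z))]) d htp
          (fun h z' hz' => hd h z' (List.mem_cons_of_mem _ hz'))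
        refine ⟨d', ?_⟩
        rw [List.foldl_cons, hstep, hd']
        simp [h1, hzlo]

-- with an empty window every row is blank
theorem gpl_blank_map (maxw lo w : Int) (g : Int → String) (hw : w < 1) :
    (PySem.List.pyRange 0 maxw 1).map (fun z =>
        if z < lo ∨ lo + w ≤ z then String.mk (List.replicate maxw.toNat ' ') else g z)
      = List.replicate maxw.toNat (String.mk (List.replicate maxw.toNat ' ')) := by
  refine (List.map_congr_left (fun z _ => if_pos (by omega))).trans ?_
  apply List.ext_getElem
  · simp [PySem.List.length_pyRange_one]
  · intro k hk1 hk2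
    rw [List.getElem_map, List.getElem_replicate]

-- B's layer for a non-controller index equals A's plane result
theorem gpl_layer_plain (char : Char) (pc : Bool) (maxw : Int) (yw : Int × Int)
    (hw : yw.2 ≤ maxw)
    (h : ¬(pc = true ∧ yw.1 = 1)) (st : List (List String) × Bool) :
    gplA_layerStep char pc maxw st yw
      = (st.1 ++ [gplB_layer char pc maxw (String.mk (List.replicate maxw.toNat ' ')) yw], st.2) := by
  obtain ⟨y, w⟩ := yw
  have hb := gpl_lo_bounds maxw w hw
  unfold gplA_layerStep
  dsimp only
  rw [gpl_plane_plain char pc maxw y w _ _ h _ [] st.2]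
  simp only [List.nil_append]
  congr 3
  unfold gplB_layer
  dsimp only
  by_cases hw1 : 1 ≤ w
  · rw [if_pos hw1, if_neg (show ¬(pc = true ∧ y = 1) from h)]
    apply List.map_congr_left
    intro z hz
    rw [PySem.List.mem_pyRange_one] at hz
    by_cases h1 : z < PySem.Int.floordiv (maxw - w) 2 ∨ PySem.Int.floordiv (maxw - w) 2 + w ≤ z
    · rw [if_pos h1, if_pos h1]
    · rw [if_neg h1, if_neg h1]
      by_cases hzl : z = PySem.Int.floordiv (maxw - w) 2
      · rw [if_pos hzl,
          gpl_base_row_full char maxw _ w z hb.1 hb.2 (by omega) (Or.inl hzl)]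
      · rw [if_neg hzl]
        by_cases hzh : z = PySem.Int.floordiv (maxw - w) 2 + w - 1
        · rw [if_pos hzh,
            gpl_base_row_full char maxw _ w z hb.1 hb.2 (by omega) (Or.inr hzh)]
        · rw [if_neg hzh, if_pos (show (2:Int) ≤ w by omega),
            gpl_base_row_mid char maxw _ w z hb.1 hb.2 (by omega) (by omega)]
  · rw [if_neg hw1]
    exact gpl_blank_map maxw _ w _ (by omega)

-- B's layer for the controller index equals A's plane result
theorem gpl_layer_ctl (char : Char) (pc : Bool) (maxw w : Int) (hpc : pc = true)
    (hw : w ≤ maxw) (st : List (List String) × Bool) (hst : st.2 = false) :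
    ∃ d', gplA_layerStep char pc maxw st (1, w)
      = (st.1 ++ [gplB_layer char pc maxw (String.mk (List.replicate maxw.toNat ' ')) (1, w)], d') := by
  have hb := gpl_lo_bounds maxw w hw
  unfold gplA_layerStep
  dsimp only
  obtain ⟨dp, hp⟩ := gpl_plane_ctl char pc maxw w (PySem.Int.floordiv (maxw - w) 2)
    (PySem.Int.floordiv maxw 2) hpc (PySem.List.pyRange 0 maxw 1) [] st.2
    (PySem.List.pairwise_lt_pyRange_one 0 maxw) (by simp [hst])
  refine ⟨dp, ?_⟩
  rw [hp]
  simp only [List.nil_append]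
  congr 3
  unfold gplB_layer
  dsimp only
  by_cases hw1 : 1 ≤ w
  · rw [if_pos hw1, if_pos ⟨hpc, rfl⟩]
    apply List.map_congr_left
    intro z hz
    rw [PySem.List.mem_pyRange_one] at hz
    by_cases h1 : z < PySem.Int.floordiv (maxw - w) 2 ∨ PySem.Int.floordiv (maxw - w) 2 + w ≤ z
    · rw [if_pos h1, if_pos h1]
    · rw [if_neg h1, if_neg h1]
      by_cases hzl : z = PySem.Int.floordiv (maxw - w) 2
      · rw [if_pos hzl, if_pos hzl,
          gpl_ctl_row char maxw _ w hb.1 hb.2 hw1 (PySem.Int.floordiv maxw 2)]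
      · rw [if_neg hzl, if_neg hzl]
        by_cases hzh : z = PySem.Int.floordiv (maxw - w) 2 + w - 1
        · rw [if_pos hzh,
            gpl_base_row_full char maxw _ w z hb.1 hb.2 hw1 (Or.inr hzh)]
        · rw [if_neg hzh, if_pos (show (2:Int) ≤ w by omega),
            gpl_base_row_mid char maxw _ w z hb.1 hb.2 (by omega) (by omega)]
  · rw [if_neg hw1]
    exact gpl_blank_map maxw _ w _ (by omega)

-- fold over non-controller indices
theorem gpl_fold_plain (char : Char) (pc : Bool) (maxw : Int) (l : List (Int × Int))
    (st : List (List String) × Bool)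
    (hb : ∀ p ∈ l, p.2 ≤ maxw)
    (h : ∀ p ∈ l, ¬(pc = true ∧ p.1 = 1)) :
    l.foldl (gplA_layerStep char pc maxw) st
      = (st.1 ++ l.map (gplB_layer char pc maxw (String.mk (List.replicate maxw.toNat ' '))), st.2) := by
  induction l generalizing st with
  | nil => simp
  | cons p t ih =>
    rw [List.foldl_cons,
      gpl_layer_plain char pc maxw p (hb p List.mem_cons_self) (h p List.mem_cons_self) st,
      ih _ (fun q hq => hb q (List.mem_cons_of_mem _ hq)) (fun q hq => h q (List.mem_cons_of_mem _ hq))]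
    simp

theorem gpl_main (char : Char) (pc : Bool) (m : Int) (widths : List Int)
    (hb : ∀ w' ∈ widths, w' ≤ m) :
    ((PySem.List.enumerate widths 0).foldl (gplA_layerStep char pc m) ([], false)).1
      = (PySem.List.enumerate widths 0).map
          (gplB_layer char pc m (String.mk (List.replicate m.toNat ' '))) := by
  by_cases hpc : pc = true
  · match widths with
    | [] => simp [PySem.List.enumerate]
    | [w0] =>
      rw [gpl_fold_plain char pc m _ _ ?hw ?hm]
      · simp
      case hw =>
        intro p hp
        simp [PySem.List.enumerate_cons, PySem.List.enumerate_nil] at hp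
        subst hp; exact hb w0 (by simp)
      case hm =>
        intro p hp
        simp [PySem.List.enumerate_cons, PySem.List.enumerate_nil] at hp
        subst hp; rintro ⟨-, h⟩; norm_num at h
    | w0 :: w1 :: rest =>
      have he : PySem.List.enumerate (w0 :: w1 :: rest) 0
          = (0, w0) :: (1, w1) :: PySem.List.enumerate rest 2 := by
        rw [PySem.List.enumerate_cons, PySem.List.enumerate_cons]
        norm_num
      rw [he, List.foldl_cons,
        gpl_layer_plain char pc m (0, w0) (hb w0 (by simp)) (by rintro ⟨-, h⟩; norm_num at h),
        List.foldl_cons]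
      obtain ⟨d', hstep⟩ := gpl_layer_ctl char pc m w1 hpc (hb w1 (by simp))
        ([gplB_layer char pc m (String.mk (List.replicate m.toNat ' ')) (0, w0)], false) rfl
      simp only [List.nil_append]
      rw [hstep, gpl_fold_plain char pc m _ _ ?hw ?hm]
      · simp
      case hw =>
        intro p hp
        rw [PySem.List.mem_enumerate_iff] at hp
        obtain ⟨k, hk, rfl⟩ := hp
        exact hb _ (by simp)
      case hm =>
        intro p hp
        rw [PySem.List.mem_enumerate_iff] at hp
        obtain ⟨k, hk, rfl⟩ := hp
        rintro ⟨-, h⟩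
        omega
  · rw [gpl_fold_plain char pc m _ _ (fun p hp => ?_) (fun p hp hc => hpc hc.1)]
    · simp
    · rw [PySem.List.mem_enumerate_iff] at hp
      obtain ⟨k, hk, rfl⟩ := hp
      exact hb _ (by simp)

-- ===== VERDICT (by name: the statement is the Claim_ definition above) =====
theorem generate_piece_layers_spec : Claim_equal_generate_piece_layers := by
  intro widths_sub section_ place_controller _
  unfold Spec_generate_piece_layers generate_piece_layers generate_piece_layers_alt
  apply gpl_main
  intro w' hw'
  cases h : PySem.List.max? widths_sub (fun x => x) with
  | none =>
    rw [PySem.List.max?_eq_none_iff] at h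
    subst h
    simp at hw'
  | some m => simpa [h] using PySem.List.max?_isMax h w' hw'
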